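-- pv_equiv track=rewrite | github.com/natyfbg/NFG | backend/app.py | _ordered_week_numbers
-- ===== SOURCE A (Python) =====
-- from typing import Dict, List, Optional, Tuple
--
-- def _ordered_week_numbers(weeks: List[dict]) -> List[int]:
--     def _as_int(val) -> int:
--         try:
--             return int(val)
--         except Exception:
--             return 0
--
--     ordered: List[int] = []
--     seen = set()
--     for w in sorted(
--         weeks,
--         key=lambda row: (_as_int(row.get("week_number")), _as_int(row.get("order"))),
--     ):
--         wn = _as_int(w.get("week_number"))
--         if wn < 1 or wn in seen:
--             continue
--         seen.add(wn)
--         ordered.append(wn)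
--     return ordered
-- ===== SOURCE B (Python) =====
-- from typing import Dict, List, Optional, Tuple
--
-- def _ordered_week_numbers(weeks: List[dict]) -> List[int]:
--     def _as_int(val) -> int:
--         try:
--             return int(val)
--         except Exception:
--             return 0
--
--     valid = {wn for wn in (_as_int(w.get("week_number")) for w in weeks) if wn >= 1}
--     return sorted(valid)
-- ===== Notes on version B (the rewrite author's own statement) =====
-- stated objective: simpler
-- what changed: Drops the sort-by-(week_number, order)-then-scan-with-a-seen-set entirely: the secondary 'order' key never affects the output, so B collects the valid week numbers into a set in one unsorted pass and returns sorted(set), replacing A's O(n log n) sort of whole dicts plus dedup scan.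
import Mathlib
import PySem

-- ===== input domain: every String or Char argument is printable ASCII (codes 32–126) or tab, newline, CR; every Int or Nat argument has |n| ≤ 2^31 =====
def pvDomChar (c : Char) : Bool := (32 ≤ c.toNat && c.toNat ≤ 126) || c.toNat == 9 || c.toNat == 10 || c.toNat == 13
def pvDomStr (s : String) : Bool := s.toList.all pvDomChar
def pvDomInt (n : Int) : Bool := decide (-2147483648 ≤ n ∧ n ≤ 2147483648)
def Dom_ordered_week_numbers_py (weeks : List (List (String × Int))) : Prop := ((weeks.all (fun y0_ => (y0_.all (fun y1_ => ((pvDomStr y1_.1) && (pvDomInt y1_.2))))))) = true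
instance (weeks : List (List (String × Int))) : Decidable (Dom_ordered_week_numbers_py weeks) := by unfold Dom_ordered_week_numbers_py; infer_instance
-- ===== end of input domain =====

-- B replaces A's sort-by-(week_number, order)-then-dedup-scan by a one-pass set of valid
-- week numbers followed by sorted(); objective: simpler (the 'order' key is irrelevant).

-- ===== PORT A =====
-- _as_int(row.get(k)): on an int dict value int() is the identity, on a missing key int(None)
-- raises and the except returns 0 — so it is exactly (get? …).getD 0 here.
def pvAsIntGet (w : List (String × Int)) (k : String) : Int :=
  (PySem.Dict.get? ⟨w⟩ k).getD 0

def ordered_week_numbers_py (weeks : List (List (String × Int))) : List Int :=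
  let sortedWeeks := PySem.List.sorted2 weeks
      (fun row => pvAsIntGet row "week_number") (fun row => pvAsIntGet row "order")
  (sortedWeeks.foldl
    (fun (st : List Int × PySem.Set Int) w =>
      let wn := pvAsIntGet w "week_number"
      if wn < 1 ∨ PySem.Set.contains st.2 wn then st
      else (st.1 ++ [wn], PySem.Set.add st.2 wn))
    ([], PySem.Set.empty)).1

-- ===== PORT B =====
def ordered_week_numbers_py_alt (weeks : List (List (String × Int))) : List Int :=
  let valid : PySem.Set Int :=
    PySem.Set.ofList
      ((weeks.map (fun w => pvAsIntGet w "week_number")).filter (fun wn => decide (1 ≤ wn)))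
  PySem.List.sorted valid (fun x => x)

-- ===== PRECONDITION & SPEC =====
def Spec_ordered_week_numbers_py (weeks : List (List (String × Int))) (out : List Int) : Prop := out = ordered_week_numbers_py_alt weeks
instance (weeks : List (List (String × Int))) (out : List Int) : Decidable (Spec_ordered_week_numbers_py weeks out) := by unfold Spec_ordered_week_numbers_py; infer_instance

-- ===== CLAIM (what is proved, stated in full; the proofs are below) =====
def Claim_equal_ordered_week_numbers_py : Prop := ∀ (weeks : List (List (String × Int))), Dom_ordered_week_numbers_py weeks → Spec_ordered_week_numbers_py weeks (ordered_week_numbers_py weeks)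

-- ===== LEMMAS AND PROOFS =====

-- inserting with sorted2's lexicographic `before` keeps the list nondecreasing in the PRIMARY key
theorem insertBy_lex_pairwise_k1 {α : Type} (k1 k2 : α → Int) (x : α) (ys : List α)
    (h : ys.Pairwise (fun a b => k1 a ≤ k1 b)) :
    (PySem.List.insertBy
        (fun a b => decide (k1 a < k1 b) || (!decide (k1 b < k1 a) && decide (k2 a < k2 b)))
        x ys).Pairwise (fun a b => k1 a ≤ k1 b) := by
  induction ys with
  | nil => simp [PySem.List.insertBy]
  | cons y ys ih =>
    rw [List.pairwise_cons] at h
    by_cases hb : (decide (k1 x < k1 y) || (!decide (k1 y < k1 x) && decide (k2 x < k2 y))) = true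
    · have hxy : k1 x ≤ k1 y := by
        rcases Bool.or_eq_true_iff.mp hb with h1 | h1
        · exact le_of_lt (by exact_mod_cast of_decide_eq_true h1)
        · have := (Bool.and_eq_true_iff.mp h1).1
          simp only [Bool.not_eq_true'] at this
          exact le_of_not_gt (of_decide_eq_false this)
      simp only [PySem.List.insertBy, hb, if_true]
      refine List.pairwise_cons.mpr ⟨?_, List.pairwise_cons.mpr h⟩
      intro z hz
      rcases List.mem_cons.mp hz with rfl | hz
      · exact hxy
      · exact le_trans hxy (h.1 z hz)
    · simp only [PySem.List.insertBy, hb]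
      refine List.pairwise_cons.mpr ⟨?_, ih h.2⟩
      intro z hz
      rcases (PySem.List.mem_insertBy _ _ _ _).mp hz with rfl | hz
      · have : ¬ (k1 z < k1 y) := by
          intro hlt
          exact hb (Bool.or_eq_true_iff.mpr (Or.inl (decide_eq_true hlt)))
        exact le_of_not_gt this
      · exact h.1 z hz

theorem foldl_insertBy_lex_pairwise_k1 {α : Type} (k1 k2 : α → Int) (xs acc : List α)
    (h : acc.Pairwise (fun a b => k1 a ≤ k1 b)) :
    (xs.foldl
      (fun acc x => PySem.List.insertBy
        (fun a b => decide (k1 a < k1 b) || (!decide (k1 b < k1 a) && decide (k2 a < k2 b)))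
        x acc) acc).Pairwise (fun a b => k1 a ≤ k1 b) := by
  induction xs generalizing acc with
  | nil => exact h
  | cons x xs ih => exact ih _ (insertBy_lex_pairwise_k1 k1 k2 x acc h)

-- sorted2's output is nondecreasing in its primary key
theorem sorted2_pairwise_k1 {α : Type} (xs : List α) (k1 k2 : α → Int) :
    (PySem.List.sorted2 xs k1 k2).Pairwise (fun a b => k1 a ≤ k1 b) := by
  simpa [PySem.List.sorted2] using
    foldl_insertBy_lex_pairwise_k1 k1 k2 xs [] (by simp)

-- set(l) of a nondecreasing int list is strictly increasing
theorem ofList_pairwise_lt (L : List Int) (h : L.Pairwise (· ≤ ·)) :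
    (PySem.Set.ofList L).Pairwise (· < ·) := by
  induction L using List.reverseRecOn with
  | nil => simp [PySem.Set.ofList]
  | append_singleton L x ih =>
    have hL : L.Pairwise (· ≤ ·) := (List.pairwise_append.mp h).1
    have hle : ∀ y ∈ L, y ≤ x := by
      intro y hy
      exact (List.pairwise_append.mp h).2.2 y hy x (List.mem_singleton_self x)
    have hof : PySem.Set.ofList (L ++ [x]) = PySem.Set.add (PySem.Set.ofList L) x := by
      simp [PySem.Set.ofList_eq_foldl]
    rw [hof]
    by_cases hm : x ∈ PySem.Set.ofList L
    · have hadd : PySem.Set.add (PySem.Set.ofList L) x = PySem.Set.ofList L := by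
        simp [PySem.Set.add, PySem.Set.contains, hm]
      rw [hadd]; exact ih hL
    · have hxnot : x ∉ PySem.Set.ofList L := hm
      have hadd : PySem.Set.add (PySem.Set.ofList L) x = PySem.Set.ofList L ++ [x] := by
        simp [PySem.Set.add, PySem.Set.contains, hm]
      rw [hadd]
      refine List.pairwise_append.mpr ⟨ih hL, List.pairwise_singleton _ _, ?_⟩
      intro a ha b hb
      rcases List.mem_singleton.mp hb with rfl
      have haL : a ∈ L := (PySem.Set.mem_ofList L a).mp ha
      refine lt_of_le_of_ne (hle a haL) ?_
      intro hax
      exact hxnot (hax ▸ ha)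

-- set() of equal-as-multiset lists are equal as multisets
theorem ofList_perm_of_perm (l₁ l₂ : List Int) (h : l₁.Perm l₂) :
    (PySem.Set.ofList l₁ : List Int).Perm (PySem.Set.ofList l₂) := by
  refine (List.perm_ext_iff_of_nodup (PySem.Set.nodup_ofList l₁) (PySem.Set.nodup_ofList l₂)).mpr ?_
  intro a
  rw [PySem.Set.mem_ofList, PySem.Set.mem_ofList]
  exact ⟨fun ha => h.mem_iff.mp ha, fun ha => h.mem_iff.mpr ha⟩

-- A's filter+dedup scan over a diagonal (ordered, seen) state is the one-accumulator set build
theorem scan_diag (f : List (String × Int) → Int) (ws : List (List (String × Int)))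
    (acc : PySem.Set Int) :
    ws.foldl
      (fun (st : List Int × PySem.Set Int) w =>
        if f w < 1 ∨ PySem.Set.contains st.2 (f w) then st
        else (st.1 ++ [f w], PySem.Set.add st.2 (f w)))
      (acc, acc)
    = (ws.foldl (fun s w => if 1 ≤ f w then PySem.Set.add s (f w) else s) acc,
       ws.foldl (fun s w => if 1 ≤ f w then PySem.Set.add s (f w) else s) acc) := by
  induction ws generalizing acc with
  | nil => rfl
  | cons w ws ih =>
    simp only [List.foldl_cons]
    by_cases h1 : f w < 1
    · have h2 : ¬ (1 ≤ f w) := by omega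
      rw [if_pos (Or.inl h1), if_neg h2]
      exact ih acc
    · have h2 : 1 ≤ f w := by omega
      by_cases hc : f w ∈ acc
      · have hcc : PySem.Set.contains acc (f w) = true := by
          simpa [PySem.Set.contains, List.contains_iff_mem] using hc
        have hadd : PySem.Set.add acc (f w) = acc := by simp [PySem.Set.add, PySem.Set.contains, hc]
        rw [if_pos (Or.inr hcc), if_pos h2, hadd]
        exact ih acc
      · have hcc : ¬ (PySem.Set.contains acc (f w) = true) := by
          simpa [PySem.Set.contains, List.contains_iff_mem] using hc
        have hadd : PySem.Set.add acc (f w) = acc ++ [f w] := by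
          simp [PySem.Set.add, PySem.Set.contains, hc]
        rw [if_neg (by exact fun h => h.elim h1 hcc), if_pos h2, hadd]
        exact ih (acc ++ [f w])

-- A's whole result is set(valid week numbers of the sorted list), in first-appearance order
theorem portA_eq_ofList (weeks : List (List (String × Int))) :
    ordered_week_numbers_py weeks =
      PySem.Set.ofList
        (((PySem.List.sorted2 weeks (fun row => pvAsIntGet row "week_number")
            (fun row => pvAsIntGet row "order")).map
            (fun w => pvAsIntGet w "week_number")).filter (fun wn => decide (1 ≤ wn))) := by
  show (List.foldl
      (fun (st : List Int × PySem.Set Int) w =>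
        if pvAsIntGet w "week_number" < 1 ∨ PySem.Set.contains st.2 (pvAsIntGet w "week_number") then st
        else (st.1 ++ [pvAsIntGet w "week_number"], PySem.Set.add st.2 (pvAsIntGet w "week_number")))
      (([] : List Int), ([] : PySem.Set Int))
      (PySem.List.sorted2 weeks (fun row => pvAsIntGet row "week_number")
        (fun row => pvAsIntGet row "order"))).1 = _
  rw [scan_diag (fun w => pvAsIntGet w "week_number")]
  rw [PySem.List.foldl_ite_eq_foldl_filter (fun w => 1 ≤ pvAsIntGet w "week_number")
      (fun s w => PySem.Set.add s (pvAsIntGet w "week_number"))]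
  rw [List.filter_map, PySem.Set.ofList_eq_foldl, List.foldl_map]
  rfl

-- ===== VERDICT (by name: the statement is the Claim_ definition above) =====
theorem ordered_week_numbers_py_spec : Claim_equal_ordered_week_numbers_py := by
  intro weeks _
  unfold Spec_ordered_week_numbers_py ordered_week_numbers_py_alt
  set f : List (String × Int) → Int := fun w => pvAsIntGet w "week_number" with hf
  set g : List (String × Int) → Int := fun w => pvAsIntGet w "order" with hg
  set s := PySem.List.sorted2 weeks f g with hs
  set Ls : List Int := (s.map f).filter (fun wn => decide (1 ≤ wn)) with hLs
  set Lw : List Int := (weeks.map f).filter (fun wn => decide (1 ≤ wn)) with hLw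
  have hA : ordered_week_numbers_py weeks = PySem.Set.ofList Ls := portA_eq_ofList weeks
  have hperm : Ls.Perm Lw :=
    ((PySem.List.sorted2_perm weeks f g false).map f).filter _
  have hpair : Ls.Pairwise (· ≤ ·) := by
    have h1 : (s.map f).Pairwise (· ≤ ·) :=
      List.pairwise_map.mpr (sorted2_pairwise_k1 weeks f g)
    exact h1.filter _
  have hlt : (PySem.Set.ofList Ls : List Int).Pairwise (· < ·) := ofList_pairwise_lt Ls hpair
  have hperm' : (PySem.Set.ofList Ls : List Int).Perm (PySem.Set.ofList Lw) :=
    ofList_perm_of_perm Ls Lw hperm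
  rw [hA]
  exact (PySem.List.sorted_eq_of_perm_of_pairwise_lt (PySem.Set.ofList Lw)
    (PySem.Set.ofList Ls) (fun x => x) hperm' hlt).symm
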